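-- pv_equiv track=rewrite | github.com/Coaspe/CoFund | agents/orchestrator_agent.py | _trim_universe
-- ===== SOURCE A (Python) =====
-- from typing import Any, Dict, List, Literal, Optional
--
-- def _trim_universe(universe: list[str], max_size: Optional[int], required: list[str]) -> list[str]:
--     if max_size is None or max_size <= 0 or len(universe) <= max_size:
--         return universe
--     required_set = set(required)
--     ordered = list(universe[:1])
--     ordered.extend(t for t in universe[1:] if t in required_set)
--     ordered.extend(t for t in universe[1:] if t not in required_set)
--     out: list[str] = []
--     seen: set[str] = set()
--     for ticker in ordered:
--         if ticker in seen:
--             continue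
--         seen.add(ticker)
--         out.append(ticker)
--         if len(out) >= max_size:
--             break
--     return out
-- ===== SOURCE B (Python) =====
-- def _trim_universe(universe, max_size, required):
--     if max_size is None or max_size <= 0 or len(universe) <= max_size:
--         return universe
--     req = set(required)
--     n = len(universe)
--     order = sorted(enumerate(universe),
--                    key=lambda p: p[0] if p[0] == 0 or p[1] in req else n + p[0])
--     return list(dict.fromkeys(t for _, t in order))[:max_size]
-- ===== Notes on version B (the rewrite author's own statement) =====
-- stated objective: alternative
-- what changed: A builds the priority order with three separate partition scans (head slice, required pass, non-required pass) and deduplicates/truncates with a manual seen-set loop that breaks early; B instead assigns every position an injective integer rank (0 for the pinned head, i for required, n+i for the rest), obtains the order by one stable sort of enumerate(universe) on that rank, and finishes with dict.fromkeys dedup plus a slice.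
import Mathlib
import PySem

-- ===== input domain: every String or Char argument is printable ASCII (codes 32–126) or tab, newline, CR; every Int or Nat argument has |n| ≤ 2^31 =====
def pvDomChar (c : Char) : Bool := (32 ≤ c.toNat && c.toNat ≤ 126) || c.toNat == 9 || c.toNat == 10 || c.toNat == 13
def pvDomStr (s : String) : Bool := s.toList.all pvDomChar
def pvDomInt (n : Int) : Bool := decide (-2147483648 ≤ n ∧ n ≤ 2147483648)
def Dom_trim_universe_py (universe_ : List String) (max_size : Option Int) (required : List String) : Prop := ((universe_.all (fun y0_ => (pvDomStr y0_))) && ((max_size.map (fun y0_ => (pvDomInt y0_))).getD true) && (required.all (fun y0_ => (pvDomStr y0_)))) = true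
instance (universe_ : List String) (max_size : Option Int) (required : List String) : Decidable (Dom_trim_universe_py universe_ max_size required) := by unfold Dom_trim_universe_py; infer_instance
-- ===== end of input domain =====

-- B replaces A's three partition scans and manual seen-set dedup loop (with break) by one stable
-- sort of enumerate(universe) under an injective integer rank, then dedup and a slice (objective: alternative).

-- ===== PORT A =====
-- A's for-loop over `ordered` with `seen`/`out` and an early break once len(out) >= max_size
def trimLoopA (ms : Int) : List String → List String → PySem.Set String → List String
  | [], out, _ => out
  | t :: rest, out, seen =>
    if PySem.Set.contains seen t then trimLoopA ms rest out seen
    else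
      let out' := out ++ [t]
      let seen' := PySem.Set.add seen t
      if ms ≤ (out'.length : Int) then out' else trimLoopA ms rest out' seen'

def trim_universe_py (universe_ : List String) (max_size : Option Int) (required : List String) : List String :=
  match max_size with
  | none => universe_
  | some ms =>
    if ms ≤ 0 then universe_
    else if (universe_.length : Int) ≤ ms then universe_
    else
      let required_set := PySem.Set.ofList required
      let ordered := PySem.List.slice universe_ none (some 1)
        ++ (PySem.List.slice universe_ (some 1) none).filter (fun t => PySem.Set.contains required_set t)
        ++ (PySem.List.slice universe_ (some 1) none).filter (fun t => !PySem.Set.contains required_set t)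
      trimLoopA ms ordered [] []

-- ===== PORT B =====
def trim_universe_py_alt (universe_ : List String) (max_size : Option Int) (required : List String) : List String :=
  match max_size with
  | none => universe_
  | some ms =>
    if ms ≤ 0 then universe_
    else if (universe_.length : Int) ≤ ms then universe_
    else
      let req := PySem.Set.ofList required
      let n : Int := universe_.length
      -- sorted(enumerate(universe), key=lambda p: p[0] if p[0] == 0 or p[1] in req else n + p[0])
      let order := PySem.List.sorted (PySem.List.enumerate universe_ 0)
        (fun p => if p.1 == 0 || PySem.Set.contains req p.2 then p.1 else n + p.1)
      PySem.List.slice (PySem.List.dedup (order.map (fun p => p.2))) none (some ms)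

-- ===== PRECONDITION & SPEC =====
def Spec_trim_universe_py (universe_ : List String) (max_size : Option Int) (required : List String) (out : List String) : Prop := out = trim_universe_py_alt universe_ max_size required
instance (universe_ : List String) (max_size : Option Int) (required : List String) (out : List String) : Decidable (Spec_trim_universe_py universe_ max_size required out) := by unfold Spec_trim_universe_py; infer_instance

-- ===== CLAIM (what is proved, stated in full; the proofs are below) =====
def Claim_equal_trim_universe_py : Prop := ∀ (universe_ : List String) (max_size : Option Int) (required : List String), Dom_trim_universe_py universe_ max_size required → Spec_trim_universe_py universe_ max_size required (trim_universe_py universe_ max_size required)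

-- ===== LEMMAS AND PROOFS =====

-- folding Set.add only appends: the accumulator is a prefix of the result
theorem foldl_add_prefix (rest : List String) : ∀ (out : PySem.Set String),
    ∃ tl, List.foldl PySem.Set.add out rest = out ++ tl := by
  induction rest with
  | nil => intro out; exact ⟨[], by simp⟩
  | cons t rest ih =>
    intro out
    simp only [List.foldl_cons]
    obtain ⟨tl, htl⟩ := ih (PySem.Set.add out t)
    by_cases h : t ∈ out
    · have : PySem.Set.add out t = out := by simp [PySem.Set.add, PySem.Set.contains, h]
      exact ⟨tl, by rw [this] at htl ⊢; exact htl⟩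
    · have : PySem.Set.add out t = out ++ [t] := by simp [PySem.Set.add, PySem.Set.contains, h]
      exact ⟨t :: tl, by rw [this] at htl ⊢; simpa using htl⟩

-- A's dedup loop with break, run with seen = out, is dedup-then-truncate
theorem trimLoopA_eq (ms : Int) (rest : List String) : ∀ (out : List String),
    out.length < ms.toNat →
    trimLoopA ms rest out out = (List.foldl PySem.Set.add out rest).take ms.toNat := by
  induction rest with
  | nil =>
    intro out h
    simp [trimLoopA, List.take_of_length_le (Nat.le_of_lt h)]
  | cons t rest ih =>
    intro out h
    by_cases hc : t ∈ out
    · have hadd : PySem.Set.add out t = out := by simp [PySem.Set.add, PySem.Set.contains, hc]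
      simp only [trimLoopA, List.foldl_cons, hadd]
      rw [if_pos (by simp [PySem.Set.contains, hc])]
      exact ih out h
    · have hadd : PySem.Set.add out t = out ++ [t] := by
        simp [PySem.Set.add, PySem.Set.contains, hc]
      have hcc : PySem.Set.contains out t = false := by simp [PySem.Set.contains, hc]
      simp only [trimLoopA, List.foldl_cons, hadd, hcc, Bool.false_eq_true, if_false]
      by_cases hb : ms ≤ (((out ++ [t]).length : Nat) : Int)
      · rw [if_pos hb]
        have hb' : ms ≤ (out.length : Int) + 1 := by simpa using hb
        have hlen : (out ++ [t]).length = ms.toNat := by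
          simp only [List.length_append, List.length_cons, List.length_nil]
          omega
        obtain ⟨tl, htl⟩ := foldl_add_prefix rest (out ++ [t])
        rw [htl, ← hlen, List.take_left]
      · rw [if_neg hb]
        have hb' : ¬ ms ≤ (out.length : Int) + 1 := by simpa using hb
        have hlt : (out ++ [t]).length < ms.toNat := by
          simp only [List.length_append, List.length_cons, List.length_nil]
          omega
        exact ih (out ++ [t]) hlt

-- every index in enumerate l s lies in [s, s + len l)
theorem enumerate_fst_bounds {l : List String} {s : Int} {p : Int × String}
    (hp : p ∈ PySem.List.enumerate l s) : s ≤ p.1 ∧ p.1 < s + l.length := by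
  obtain ⟨k, hk, rfl⟩ := (PySem.List.mem_enumerate_iff _ _ _).1 hp
  simp only []
  omega

-- filtering enumerate by a predicate on the value and projecting = filtering the list
theorem filter_map_snd (c : String → Bool) : ∀ (l : List String) (s : Int),
    ((PySem.List.enumerate l s).filter (fun p => c p.2)).map (fun p => p.2) = l.filter c := by
  intro l
  induction l with
  | nil => intro s; simp [PySem.List.enumerate_nil]
  | cons t l ih =>
    intro s
    rw [PySem.List.enumerate_cons]
    by_cases h : c t <;> simp [h, ih (s + 1)]

-- the sort under the injective rank yields head, then required, then the rest
theorem sorted_rank (req : PySem.Set String) (u : String) (tail : List String) :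
    PySem.List.sorted (PySem.List.enumerate (u :: tail) 0)
      (fun p => if p.1 == 0 || PySem.Set.contains req p.2 then p.1
                else ((u :: tail).length : Int) + p.1)
    = (0, u) :: ((PySem.List.enumerate tail 1).filter (fun p => PySem.Set.contains req p.2)
        ++ (PySem.List.enumerate tail 1).filter (fun p => !PySem.Set.contains req p.2)) := by
  set n : Int := ((u :: tail).length : Int) with hn
  set key : Int × String → Int :=
    (fun p => if p.1 == 0 || PySem.Set.contains req p.2 then p.1 else n + p.1) with hkey
  set e := PySem.List.enumerate tail 1 with he
  have hbnd : ∀ p ∈ e, 1 ≤ p.1 ∧ p.1 < n := by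
    intro p hp
    have := enumerate_fst_bounds hp
    constructor
    · exact this.1
    · have : p.1 < 1 + (tail.length : Int) := this.2
      simp only [hn, List.length_cons]
      push_cast
      omega
  apply PySem.List.sorted_eq_of_perm_of_pairwise_lt
  · rw [PySem.List.enumerate_cons]
    exact List.Perm.cons _ (List.filter_append_perm _ e)
  · constructor
    · intro q hq
      have hq' : q ∈ e := by
        rcases List.mem_append.1 hq with h | h
        · exact List.mem_of_mem_filter h
        · exact List.mem_of_mem_filter h
      have h1 := (hbnd q hq').1
      have h2 : (1 : Int) ≤ n := by
        simp only [hn, List.length_cons]; push_cast; omega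
      simp only [hkey]
      rw [if_pos (by simp)]
      split <;> omega
    · rw [List.pairwise_append]
      refine ⟨?_, ?_, ?_⟩
      · refine List.Pairwise.imp_of_mem ?_ ((PySem.List.pairwise_lt_enumerate tail 1).filter _)
        intro a b ha hb hab
        have hca : a.2 ∈ req := by
          simpa [PySem.Set.contains] using (List.mem_filter.1 ha).2
        have hcb : b.2 ∈ req := by
          simpa [PySem.Set.contains] using (List.mem_filter.1 hb).2
        simp only [hkey]
        rw [if_pos (by simp [hca]), if_pos (by simp [hcb])]
        exact hab
      · refine List.Pairwise.imp_of_mem ?_ ((PySem.List.pairwise_lt_enumerate tail 1).filter _)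
        intro a b ha hb hab
        have h1a := (hbnd a (List.mem_of_mem_filter ha)).1
        have h1b := (hbnd b (List.mem_of_mem_filter hb)).1
        have hca : a.2 ∉ req := by
          simpa [PySem.Set.contains] using (List.mem_filter.1 ha).2
        have hcb : b.2 ∉ req := by
          simpa [PySem.Set.contains] using (List.mem_filter.1 hb).2
        simp only [hkey]
        rw [if_neg (by simp; exact ⟨by omega, hca⟩),
            if_neg (by simp; exact ⟨by omega, hcb⟩)]
        omega
      · intro a ha b hb
        have hba := hbnd a (List.mem_of_mem_filter ha)
        have h1b := (hbnd b (List.mem_of_mem_filter hb)).1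
        have hca : a.2 ∈ req := by
          simpa [PySem.Set.contains] using (List.mem_filter.1 ha).2
        have hcb : b.2 ∉ req := by
          simpa [PySem.Set.contains] using (List.mem_filter.1 hb).2
        simp only [hkey]
        rw [if_pos (by simp [hca]), if_neg (by simp; exact ⟨by omega, hcb⟩)]
        omega

-- ===== VERDICT (by name: the statement is the Claim_ definition above) =====
theorem trim_universe_py_spec : Claim_equal_trim_universe_py := by
  intro universe_ max_size required _
  unfold Spec_trim_universe_py trim_universe_py trim_universe_py_alt
  match max_size with
  | none => rfl
  | some ms =>
    by_cases h1 : ms ≤ 0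
    · simp [h1]
    by_cases h2 : (universe_.length : Int) ≤ ms
    · simp [h1, h2]
    simp only [h1, h2, if_false]
    have hms : 0 < ms := by omega
    obtain ⟨u, tail, rfl⟩ : ∃ u tail, universe_ = u :: tail := by
      cases universe_ with
      | nil => exact absurd (by simpa using le_of_lt hms) h2
      | cons u t => exact ⟨u, t, rfl⟩
    set rs := PySem.Set.ofList required with hrs
    -- A side
    have hA1 : PySem.List.slice (u :: tail) none (some 1) = [u] := by
      rw [PySem.List.slice_to (u :: tail) (by omega : (0:Int) ≤ 1)]; rfl
    have hA2 : PySem.List.slice (u :: tail) (some 1) none = tail := by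
      rw [PySem.List.slice_from_one]; rfl
    rw [hA1, hA2]
    -- B side: name the sorted order, then project
    rw [sorted_rank rs u tail]
    rw [List.map_cons, List.map_append,
        filter_map_snd (fun t => PySem.Set.contains rs t) tail 1,
        filter_map_snd (fun t => !PySem.Set.contains rs t) tail 1]
    -- B's dedup/slice vs A's loop
    rw [PySem.List.dedup_eq_ofList, PySem.Set.ofList_eq_foldl,
        PySem.List.slice_to _ (le_of_lt hms)]
    have := trimLoopA_eq ms
      ([u] ++ tail.filter (fun t => PySem.Set.contains rs t)
           ++ tail.filter (fun t => !PySem.Set.contains rs t)) []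
      (by simp; omega)
    simpa using this
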